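-- pv_equiv track=rewrite | github.com/Dhruv-Panwala/Health-Workers-Assistant-Project | pocketflow-text2sql/New.py | sanitize_comparison_phrase_tokens
-- ===== SOURCE A (Python) =====
-- from typing import Any, Dict, List, Optional, Sequence, Tuple
--
-- EXPLAINABLE_STOP_WORDS = {
--     "a", "about", "an", "and", "are", "chance", "chances", "describe", "did", "do", "does",
--     "explain", "give", "how", "in", "is", "likelihood", "me", "odds", "of", "patient", "patients",
--     "probability", "risk", "tell", "the", "there", "was", "were", "what", "who", "why",
--     "to",
-- }
--
-- COMPARISON_NOISE_TOKENS = {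
--     "case", "category", "categories",
--     "align", "aligned", "alignment", "between", "compare", "compared", "comparison", "data",
--     "difference", "different", "evidence", "line", "lines", "lineup", "matter", "matters", "mean",
--     "means", "result", "show", "shows", "symptom", "symptoms", "sign", "signs", "test", "tests",
--     "versus", "vs", "treat", "treatment", "therapy", "therapies",
-- }
--
-- def singularize(token: str) -> str:
--     if token in {"die", "dies", "died", "dying", "fatal", "fatality", "fatalities", "mortality"}:
--         return "death"
--     if token.endswith("ies") and len(token) > 4:
--         return token[:-3] + "y"
--     if token.endswith("s") and len(token) > 3:
--         return token[:-1]
--     return token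
--
-- def dedupe_tokens(tokens: Sequence[str]) -> List[str]:
--     cleaned_tokens: List[str] = []
--     seen_tokens = set()
--     for token in tokens:
--         singular_token = singularize(token)
--         if not singular_token or singular_token in seen_tokens:
--             continue
--         cleaned_tokens.append(singular_token)
--         seen_tokens.add(singular_token)
--     return cleaned_tokens
--
-- def sanitize_comparison_phrase_tokens(tokens: Sequence[str]) -> List[str]:
--     cleaned_tokens = [
--         singularize(token)
--         for token in tokens
--         if token
--         and not token.isdigit()
--         and singularize(token) not in EXPLAINABLE_STOP_WORDS
--         and singularize(token) not in COMPARISON_NOISE_TOKENS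
--         and singularize(token) not in {"our", "their", "this", "those", "your"}
--     ]
--     cleaned_tokens = dedupe_tokens(cleaned_tokens)
--     if cleaned_tokens:
--         return cleaned_tokens
--
--     fallback_tokens = [
--         singularize(token)
--         for token in tokens
--         if token and not token.isdigit() and singularize(token) not in EXPLAINABLE_STOP_WORDS
--     ]
--     return dedupe_tokens(fallback_tokens)
-- ===== SOURCE B (Python) =====
-- EXPLAINABLE_STOP_WORDS = {
--     "a", "about", "an", "and", "are", "chance", "chances", "describe", "did", "do", "does",
--     "explain", "give", "how", "in", "is", "likelihood", "me", "odds", "of", "patient", "patients",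
--     "probability", "risk", "tell", "the", "there", "was", "were", "what", "who", "why",
--     "to",
-- }
--
-- COMPARISON_NOISE_TOKENS = {
--     "case", "category", "categories",
--     "align", "aligned", "alignment", "between", "compare", "compared", "comparison", "data",
--     "difference", "different", "evidence", "line", "lines", "lineup", "matter", "matters", "mean",
--     "means", "result", "show", "shows", "symptom", "symptoms", "sign", "signs", "test", "tests",
--     "versus", "vs", "treat", "treatment", "therapy", "therapies",
-- }
--
-- PRONOUN_TOKENS = {"our", "their", "this", "those", "your"}
--
-- def singularize(token: str) -> str:
--     if token in {"die", "dies", "died", "dying", "fatal", "fatality", "fatalities", "mortality"}: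
--         return "death"
--     if token.endswith("ies") and len(token) > 4:
--         return token[:-3] + "y"
--     if token.endswith("s") and len(token) > 3:
--         return token[:-1]
--     return token
--
-- def sanitize_comparison_phrase_tokens(tokens):
--     # One pass: build the primary list and the fallback list together, each with
--     # its own independent seen-set; emit the doubly-singularized form (the
--     # original dedupes the already-singularized tokens, singularizing again).
--     primary, fallback = [], []
--     seen_p, seen_f = set(), set()
--     for token in tokens:
--         if not token or token.isdigit():
--             continue
--         s = singularize(token)
--         if s in EXPLAINABLE_STOP_WORDS:
--             continue
--         out = singularize(s)
--         if s not in COMPARISON_NOISE_TOKENS and s not in PRONOUN_TOKENS and out not in seen_p: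
--             primary.append(out)
--             seen_p.add(out)
--         if out not in seen_f:
--             fallback.append(out)
--             seen_f.add(out)
--     return primary if primary else fallback
-- ===== Notes on version B (the rewrite author's own statement) =====
-- stated objective: faster
-- what changed: Replaces A's four passes (two filter+map comprehensions plus two dedupe passes, the comprehensions calling singularize up to four times per token) with a single loop over tokens that computes singularize once (plus once for the dedupe normalization), maintains primary and fallback lists with independent seen-sets simultaneously, and picks the non-empty one at the end.
import Mathlib
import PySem

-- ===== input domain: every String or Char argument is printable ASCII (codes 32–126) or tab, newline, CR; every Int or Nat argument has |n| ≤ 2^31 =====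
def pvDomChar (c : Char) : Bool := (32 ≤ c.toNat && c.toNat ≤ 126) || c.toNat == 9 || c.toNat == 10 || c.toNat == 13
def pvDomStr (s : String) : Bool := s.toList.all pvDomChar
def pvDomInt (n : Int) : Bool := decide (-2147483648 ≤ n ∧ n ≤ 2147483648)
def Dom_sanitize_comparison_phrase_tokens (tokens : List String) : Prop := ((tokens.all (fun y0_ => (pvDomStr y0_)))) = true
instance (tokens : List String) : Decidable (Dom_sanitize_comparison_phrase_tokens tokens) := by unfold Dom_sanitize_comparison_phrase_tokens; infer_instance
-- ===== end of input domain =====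

-- B folds the four passes of A (two filter+map comprehensions and two dedupe loops)
-- into ONE loop over tokens maintaining primary and fallback lists with independent
-- seen-sets; same return value, fewer singularize calls per token (objective: faster,
-- constant factor).

-- ===== PORT A =====
-- module constants (Python sets used only for membership tests)
def pvStop : List String :=
  ["a", "about", "an", "and", "are", "chance", "chances", "describe", "did", "do", "does",
   "explain", "give", "how", "in", "is", "likelihood", "me", "odds", "of", "patient", "patients",
   "probability", "risk", "tell", "the", "there", "was", "were", "what", "who", "why", "to"]

def pvNoise : List String :=
  ["case", "category", "categories",
   "align", "aligned", "alignment", "between", "compare", "compared", "comparison", "data",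
   "difference", "different", "evidence", "line", "lines", "lineup", "matter", "matters", "mean",
   "means", "result", "show", "shows", "symptom", "symptoms", "sign", "signs", "test", "tests",
   "versus", "vs", "treat", "treatment", "therapy", "therapies"]

def pvPron : List String := ["our", "their", "this", "those", "your"]

-- helper singularize (shared module helper of both Pythons)
def pvSingularize (t : String) : String :=
  if t = "die" ∨ t = "dies" ∨ t = "died" ∨ t = "dying" ∨ t = "fatal" ∨ t = "fatality" ∨
     t = "fatalities" ∨ t = "mortality" then "death"
  else if PySem.Str.endswith t "ies" = true ∧ 4 < PySem.Str.len t then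
    String.ofList (PySem.Chars.slice t.toList none (some (-3)) ++ "y".toList)
  else if PySem.Str.endswith t "s" = true ∧ 3 < PySem.Str.len t then
    String.ofList (PySem.Chars.slice t.toList none (some (-1)))
  else t

-- dedupe_tokens: loop appending unseen singularized tokens
def pvDedupeStep (st : List String × PySem.Set String) (token : String) :
    List String × PySem.Set String :=
  let s := pvSingularize token
  if s = "" ∨ PySem.Set.contains st.2 s then st
  else (st.1 ++ [s], PySem.Set.add st.2 s)

def pvDedupe (ts : List String) : List String :=
  (ts.foldl pvDedupeStep ([], PySem.Set.empty)).1

-- the first comprehension's filter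
def pvCondA (t : String) : Bool :=
  !(t == "") && !(PySem.Str.strIsdigit t) && !(pvStop.contains (pvSingularize t)) &&
  !(pvNoise.contains (pvSingularize t)) && !(pvPron.contains (pvSingularize t))

-- the fallback comprehension's filter
def pvCondF (t : String) : Bool :=
  !(t == "") && !(PySem.Str.strIsdigit t) && !(pvStop.contains (pvSingularize t))

def sanitize_comparison_phrase_tokens (tokens : List String) : List String :=
  let cleaned := pvDedupe ((tokens.filter pvCondA).map pvSingularize)
  if cleaned ≠ [] then cleaned
  else pvDedupe ((tokens.filter pvCondF).map pvSingularize)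

-- ===== PORT B =====
-- one loop step: state = ((primary, seen_p), (fallback, seen_f))
def pvStepB (st : (List String × PySem.Set String) × (List String × PySem.Set String))
    (token : String) : (List String × PySem.Set String) × (List String × PySem.Set String) :=
  if token == "" || PySem.Str.strIsdigit token then st
  else
    let s := pvSingularize token
    if pvStop.contains s then st
    else
      let out := pvSingularize s
      let p := if !(pvNoise.contains s) && !(pvPron.contains s) &&
                  !(PySem.Set.contains st.1.2 out)
               then (st.1.1 ++ [out], PySem.Set.add st.1.2 out) else st.1
      let f := if !(PySem.Set.contains st.2.2 out)
               then (st.2.1 ++ [out], PySem.Set.add st.2.2 out) else st.2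
      (p, f)

def sanitize_comparison_phrase_tokens_alt (tokens : List String) : List String :=
  let st := tokens.foldl pvStepB (([], PySem.Set.empty), ([], PySem.Set.empty))
  if st.1.1 ≠ [] then st.1.1 else st.2.1

-- ===== PRECONDITION & SPEC =====
def Spec_sanitize_comparison_phrase_tokens (tokens : List String) (out : List String) : Prop := out = sanitize_comparison_phrase_tokens_alt tokens
instance (tokens : List String) (out : List String) : Decidable (Spec_sanitize_comparison_phrase_tokens tokens out) := by unfold Spec_sanitize_comparison_phrase_tokens; infer_instance

-- ===== CLAIM (what is proved, stated in full; the proofs are below) =====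
def Claim_equal_sanitize_comparison_phrase_tokens : Prop := ∀ (tokens : List String), Dom_sanitize_comparison_phrase_tokens tokens → Spec_sanitize_comparison_phrase_tokens tokens (sanitize_comparison_phrase_tokens tokens)

-- ===== LEMMAS AND PROOFS =====

lemma pvSingularize_ne_empty (t : String) (h : t ≠ "") : pvSingularize t ≠ "" := by
  unfold pvSingularize
  split_ifs with h1 h2 h3
  · decide
  · intro he
    have := String.ofList_inj.mp he
    simp at this
  · intro he
    have h4 := String.ofList_inj.mp he
    rw [PySem.Chars.slice_eq_listSlice, PySem.List.slice_to_neg_one] at h4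
    have h5 : t.toList ≠ [] := fun hn => h (String.toList_eq_nil_iff.mp hn)
    have h6 : t.toList.length - 1 = 0 := by
      have := congrArg List.length h4
      rwa [List.length_dropLast, List.length_nil] at this
    have h7 : 3 < t.toList.length := by
      have := h3.2
      simp [PySem.Str.len_eq, -String.length_toList] at this
      omega
    omega
  · exact h

lemma fold_split (ts : List String)
    (st : (List String × PySem.Set String) × (List String × PySem.Set String)) :
    ts.foldl pvStepB st =
      (((ts.filter pvCondA).map pvSingularize).foldl pvDedupeStep st.1,
       ((ts.filter pvCondF).map pvSingularize).foldl pvDedupeStep st.2) := by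
  induction ts generalizing st with
  | nil => rfl
  | cons t ts ih =>
    simp only [List.foldl_cons]
    by_cases h0 : (t == "" || PySem.Str.strIsdigit t) = true
    · have h0' : t = "" ∨ PySem.Chars.strIsdigit t.toList = true := by
        rcases Bool.or_eq_true_iff.mp h0 with h | h
        · exact Or.inl (by simpa using h)
        · exact Or.inr (by simpa using h)
      have hA : pvCondA t = false := by
        rcases h0' with h | h <;> simp [pvCondA, h]
      have hF : pvCondF t = false := by
        rcases h0' with h | h <;> simp [pvCondF, h]
      have hs : pvStepB st t = st := by
        rcases h0' with h | h <;> simp [pvStepB, h]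
      rw [hs, @List.filter_cons_of_neg _ pvCondA t ts (by simp [hA]),
        @List.filter_cons_of_neg _ pvCondF t ts (by simp [hF])]
      exact ih st
    · have ht : t ≠ "" := by
        intro he; apply h0; simp [he]
      have hd : PySem.Chars.strIsdigit t.toList = false := by
        have : PySem.Str.strIsdigit t = false := by
          cases hdt : PySem.Str.strIsdigit t
          · rfl
          · exact absurd (Bool.or_eq_true_iff.mpr (Or.inr hdt)) h0
        simpa using this
      have hout : pvSingularize (pvSingularize t) ≠ "" :=
        pvSingularize_ne_empty _ (pvSingularize_ne_empty t ht)
      by_cases h2 : pvSingularize t ∈ pvStop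
      · have hA : pvCondA t = false := by simp [pvCondA, h2]
        have hF : pvCondF t = false := by simp [pvCondF, h2]
        have hs : pvStepB st t = st := by simp [pvStepB, ht, hd, h2]
        rw [hs, @List.filter_cons_of_neg _ pvCondA t ts (by simp [hA]),
          @List.filter_cons_of_neg _ pvCondF t ts (by simp [hF])]
        exact ih st
      · have hF : pvCondF t = true := by simp [pvCondF, ht, hd, h2]
        rw [@List.filter_cons_of_pos _ pvCondF t ts hF]
        simp only [List.map_cons, List.foldl_cons]
        by_cases h3 : pvSingularize t ∈ pvNoise ∨ pvSingularize t ∈ pvPron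
        · have hA : pvCondA t = false := by
            rcases h3 with h | h <;> simp [pvCondA, h]
          rw [@List.filter_cons_of_neg _ pvCondA t ts (by simp [hA]), ih]
          refine congrArg₂ Prod.mk (congrArg₂ _ ?_ rfl) (congrArg₂ _ ?_ rfl)
          · -- primary state unchanged on both sides
            rcases h3 with h | h <;> simp [pvStepB, ht, hd, h2, h]
          · -- fallback states agree
            simp [pvStepB, pvDedupeStep, ht, hd, h2, hout]
        · have hA : pvCondA t = true := by
            simp [pvCondA, ht, hd, h2, (not_or.mp h3).1, (not_or.mp h3).2]
          rw [@List.filter_cons_of_pos _ pvCondA t ts hA]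
          simp only [List.map_cons, List.foldl_cons]
          rw [ih]
          refine congrArg₂ Prod.mk (congrArg₂ _ ?_ rfl) (congrArg₂ _ ?_ rfl)
          · simp [pvStepB, pvDedupeStep, ht, hd, h2, hout,
              (not_or.mp h3).1, (not_or.mp h3).2]
          · simp [pvStepB, pvDedupeStep, ht, hd, h2, hout]

-- ===== VERDICT (by name: the statement is the Claim_ definition above) =====
theorem sanitize_comparison_phrase_tokens_spec : Claim_equal_sanitize_comparison_phrase_tokens := by
  intro tokens _
  unfold Spec_sanitize_comparison_phrase_tokens sanitize_comparison_phrase_tokens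
    sanitize_comparison_phrase_tokens_alt pvDedupe
  rw [fold_split]
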